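-- pv_equiv track=rewrite | github.com/jerrynguy/final-project | src/multi_function_agent/_robot_vision_controller/core/query_extractor.py | parse_robot_command_from_query
-- ===== SOURCE A (Python) =====
-- from typing import Dict, Any
--
-- def parse_robot_command_from_query(query: str) -> Dict[str, str]:
--     """
--     Parse robot control parameters from natural language query.
--     """
--     query_lower = query.lower()
--
--     # Define keyword mappings for each parameter
--     param_keywords = {
--         "control_mode": {
--             "autonomous": ["autonomous", "auto", "independent"],
--         },
--         "navigation_goal": {
--             "explore": ["explore", "wander", "discover"],
--         },
--         "safety_level": {
--             "high": ["safe", "careful", "slow", "conservative"],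
--             "low": ["fast", "quick", "aggressive", "bold"],
--             "medium": [],
--         },
--     }
--
--     # Default parameters
--     params = {
--         "control_mode": "autonomous",
--         "navigation_goal": "explore",
--         "safety_level": "medium",
--     }
--
--     # Match keywords to set parameters
--     for param_name, options in param_keywords.items():
--         for value, keywords in options.items():
--             if any(word in query_lower for word in keywords):
--                 params[param_name] = value
--                 break
--
--     return params
-- ===== SOURCE B (Python) =====
-- def parse_robot_command_from_query(query: str):
--     """Parse robot control parameters from natural language query."""
--     query_lower = query.lower()
--     params = {
--         "control_mode": "autonomous",
--         "navigation_goal": "explore",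
--         "safety_level": "medium",
--     }
--     if any(w in query_lower for w in ("safe", "careful", "slow", "conservative")):
--         params["safety_level"] = "high"
--     elif any(w in query_lower for w in ("fast", "quick", "aggressive", "bold")):
--         params["safety_level"] = "low"
--     return params
-- ===== Notes on version B (the rewrite author's own statement) =====
-- stated objective: simpler
-- what changed: Replaced the data-driven nested loop over a keyword table with direct conditionals that only decide safety_level, dropping the control_mode/navigation_goal loops which can never change the defaults.
import Mathlib
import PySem

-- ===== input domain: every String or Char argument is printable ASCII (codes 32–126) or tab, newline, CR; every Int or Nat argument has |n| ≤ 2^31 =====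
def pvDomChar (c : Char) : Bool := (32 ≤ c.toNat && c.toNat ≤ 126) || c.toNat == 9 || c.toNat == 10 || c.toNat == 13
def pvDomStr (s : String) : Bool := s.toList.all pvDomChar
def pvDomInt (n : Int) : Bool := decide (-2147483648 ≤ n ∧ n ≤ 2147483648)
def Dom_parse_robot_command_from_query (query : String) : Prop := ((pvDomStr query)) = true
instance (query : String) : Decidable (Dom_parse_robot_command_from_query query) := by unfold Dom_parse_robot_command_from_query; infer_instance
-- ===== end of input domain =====

-- B replaces A's data-driven nested loop over a keyword table by direct conditionals that
-- only decide safety_level (the other two loops of A can never change the defaults); objective: simpler.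

-- ===== PORT A =====
-- any(word in query_lower for word in keywords)
def pvAnyIn (keywords : List String) (ql : String) : Bool :=
  keywords.any (fun w => PySem.Str.isIn w ql)

-- inner 'for value, keywords in options.items(): … break'
def pvInnerLoop (pname : String) (options : List (String × List String)) (ql : String)
    (params : PySem.Dict String String) : PySem.Dict String String :=
  match options with
  | [] => params
  | (v, kws) :: rest =>
    if pvAnyIn kws ql then params.insert pname v
    else pvInnerLoop pname rest ql params

def pvParamKeywords : List (String × List (String × List String)) :=
  [("control_mode", [("autonomous", ["autonomous", "auto", "independent"])]),
   ("navigation_goal", [("explore", ["explore", "wander", "discover"])]),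
   ("safety_level", [("high", ["safe", "careful", "slow", "conservative"]),
                     ("low", ["fast", "quick", "aggressive", "bold"]),
                     ("medium", [])])]

def parse_robot_command_from_query (query : String) : List (String × String) :=
  let ql := PySem.Str.lower query
  let params : PySem.Dict String String :=
    ((PySem.Dict.empty.insert "control_mode" "autonomous").insert
        "navigation_goal" "explore").insert "safety_level" "medium"
  (pvParamKeywords.foldl (fun p pr => pvInnerLoop pr.1 pr.2 ql p) params).items

-- ===== PORT B =====
def parse_robot_command_from_query_alt (query : String) : List (String × String) :=
  let ql := PySem.Str.lower query
  [("control_mode", "autonomous"),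
   ("navigation_goal", "explore"),
   ("safety_level",
     if ["safe", "careful", "slow", "conservative"].any (fun w => PySem.Str.isIn w ql) then "high"
     else if ["fast", "quick", "aggressive", "bold"].any (fun w => PySem.Str.isIn w ql) then "low"
     else "medium")]

-- ===== PRECONDITION & SPEC =====
def Spec_parse_robot_command_from_query (query : String) (out : List (String × String)) : Prop := out = parse_robot_command_from_query_alt query
instance (query : String) (out : List (String × String)) : Decidable (Spec_parse_robot_command_from_query query out) := by unfold Spec_parse_robot_command_from_query; infer_instance

-- ===== CLAIM (what is proved, stated in full; the proofs are below) =====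
def Claim_equal_parse_robot_command_from_query : Prop := ∀ (query : String), Dom_parse_robot_command_from_query query → Spec_parse_robot_command_from_query query (parse_robot_command_from_query query)

-- ===== LEMMAS AND PROOFS =====
theorem parse_eq (query : String) :
    parse_robot_command_from_query query = parse_robot_command_from_query_alt query := by
  unfold parse_robot_command_from_query parse_robot_command_from_query_alt
  set ql := PySem.Str.lower query with hql
  by_cases h1 : pvAnyIn ["autonomous", "auto", "independent"] ql = true <;>
  by_cases h2 : pvAnyIn ["explore", "wander", "discover"] ql = true <;>
  by_cases h3 : pvAnyIn ["safe", "careful", "slow", "conservative"] ql = true <;>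
  by_cases h4 : pvAnyIn ["fast", "quick", "aggressive", "bold"] ql = true <;>
  simp_all [pvParamKeywords, pvInnerLoop, pvAnyIn, List.foldl] <;>
  decide

-- ===== VERDICT (by name: the statement is the Claim_ definition above) =====
theorem parse_robot_command_from_query_spec : Claim_equal_parse_robot_command_from_query := by
  intro query _
  exact parse_eq query
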